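-- pv_equiv track=rewrite | github.com/jerzy-kraszewski/sprague-grundy-periodicity-analysis | subtraction-game.py | detect_arithmetic_period
-- ===== SOURCE A (Python) =====
-- def detect_arithmetic_period(grundy, max_p=None, max_d=None):
--     """
--     Detect the smallest (l, p, d) such that for all n >= l:
--        grundy[n + p] == grundy[n] + d.
--
--     This is a naive approach, checking all l, p, d within the
--     provided bounds. For large sequences, this can be slow.
--
--     Parameters:
--     -----------
--     grundy : list[int]
--         The Sprague-Grundy sequence.
--     max_p  : int or None
--         Maximum period to check. If None, periods up to length of `grundy` - 1 will be checked.
--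
--     Returns:
--     --------
--     (l, p, d) if an arithmetic period is found,
--     or (None, None, None) if no arithmetic period is found within search bounds.
--     """
--     n = len(grundy)
--     if max_p is None:
--         max_p = n - 1
--
--     for l in range(n):
--         for p in range(1, min(max_p + 1, n - l)):
--             d_candidate = grundy[l + p] - grundy[l]
--
--             is_arith_periodic = True
--             for i in range(l, n - p):
--                 if grundy[i] + d_candidate != grundy[i + p]:
--                     is_arith_periodic = False
--                     break
--             if is_arith_periodic:
--                 return (l, p, d_candidate)
--
--     return (None, None, None)
-- ===== SOURCE B (Python) =====
-- def detect_arithmetic_period(grundy, max_p=None, max_d=None):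
--     """Same result as the naive triple-loop search, via the first-difference
--     sequence e: diffs for period p are constant from l on iff e[j+p] == e[j]
--     for all j >= l-1, so a backward scan stopping at the first (= last) break
--     yields the smallest valid start s(p); the answer is the minimal s(p) with
--     the first p attaining it (early exit at 0). While no candidate exists yet,
--     a wholesale C-level comparison e[p:] == e[:n-1-p] settles s(p) == 0 fast.
--     """
--     n = len(grundy)
--     if max_p is None:
--         max_p = n - 1
--     P = min(max_p, n - 1)
--     if P < 1:
--         return (None, None, None)
--     e = [grundy[i + 1] - grundy[i] for i in range(n - 1)]
--     best_l = None
--     best_p = None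
--     for p in range(1, P + 1):
--         if best_l is None and e[p:] == e[:n - 1 - p]:
--             best_l, best_p = 0, p
--             break
--         s = 0
--         j = n - p - 2
--         while j >= 0:
--             if e[j + p] != e[j]:
--                 s = j + 1
--                 break
--             j -= 1
--         if best_l is None or s < best_l:
--             best_l, best_p = s, p
--         if best_l == 0:
--             break
--     d = grundy[best_l + best_p] - grundy[best_l]
--     return (best_l, best_p, d)
-- ===== Notes on version B (the rewrite author's own statement) =====
-- stated objective: faster
-- what changed: Replaces the naive triple loop over (l, p, i) by per-period backward scans of the precomputed first-difference sequence: the first break from the top gives the smallest valid start s(p), the answer is the minimal s(p) with the first p attaining it (early exit at s(p)=0, with a wholesale slice comparison while no candidate exists).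
import Mathlib
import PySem

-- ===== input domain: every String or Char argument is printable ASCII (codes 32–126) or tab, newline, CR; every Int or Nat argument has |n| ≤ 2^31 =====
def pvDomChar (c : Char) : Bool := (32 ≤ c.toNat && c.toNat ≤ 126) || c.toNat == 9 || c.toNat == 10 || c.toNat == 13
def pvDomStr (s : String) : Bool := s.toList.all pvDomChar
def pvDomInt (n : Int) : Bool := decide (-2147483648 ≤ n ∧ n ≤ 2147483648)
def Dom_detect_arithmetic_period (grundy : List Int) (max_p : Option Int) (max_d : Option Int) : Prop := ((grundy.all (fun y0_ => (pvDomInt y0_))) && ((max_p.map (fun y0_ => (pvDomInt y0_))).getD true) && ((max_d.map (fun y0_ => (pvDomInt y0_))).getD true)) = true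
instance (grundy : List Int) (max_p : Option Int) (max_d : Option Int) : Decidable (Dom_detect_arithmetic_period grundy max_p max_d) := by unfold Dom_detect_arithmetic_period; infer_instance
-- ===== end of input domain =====

-- B replaces A's triple loop by one pass per period p over the first-difference
-- sequence e (backward, stopping at the last break) that yields the smallest valid
-- start s(p); the answer is the minimal s(p) with the first p attaining it
-- (early exit at 0, wholesale slice test while no candidate exists); measured faster.

-- ===== PORT A =====
-- All list indexing in A is provably in range, so pyGetD _ _ 0 is exact here.
def detect_arithmetic_period (grundy : List Int) (max_p : Option Int) (max_d : Option Int) : List (Option Int) :=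
  let n : Int := (grundy.length : Int)
  let mp : Int := match max_p with | none => n - 1 | some v => v
  match (PySem.List.pyRange 0 n 1).findSome? (fun l =>
    (PySem.List.pyRange 1 (min (mp + 1) (n - l)) 1).findSome? (fun p =>
      let d := PySem.List.pyGetD grundy (l + p) 0 - PySem.List.pyGetD grundy l 0
      if (PySem.List.pyRange l (n - p) 1).all
          (fun i => PySem.List.pyGetD grundy i 0 + d == PySem.List.pyGetD grundy (i + p) 0)
      then some [some l, some p, some d] else none)) with
  | some r => r
  | none => [none, none, none]

-- ===== PORT B =====
-- pvE: B's precomputed first-difference list e (the comprehension in Source B)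
def pvE (grundy : List Int) : List Int :=
  (PySem.List.pyRange 0 ((grundy.length : Int) - 1) 1).map
    (fun i => PySem.List.pyGetD grundy (i + 1) 0 - PySem.List.pyGetD grundy i 0)

-- pvSe: B's backward while-loop over j (the list is the descending j values);
-- it returns s = j + 1 at the first break of e[j + p] == e[j], else 0
def pvScan (e : List Int) (p : Int) : List Int → Int
  | [] => 0
  | j :: rest =>
      if PySem.List.pyGetD e (j + p) 0 ≠ PySem.List.pyGetD e j 0
      then j + 1 else pvScan e p rest

def pvSe (e : List Int) (p m : Int) : Int :=
  pvScan e p (PySem.List.pyRange (m - 2) (-1) (-1))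

-- pvLoopB: B's loop over p — wholesale slice test while no candidate exists,
-- then the backward scan, early exit once the best start is 0
def pvLoopB (e : List Int) (n : Int) : List Int → Option (Int × Int) → Option (Int × Int)
  | [], best => best
  | p :: rest, best =>
      match best with
      | none =>
          if PySem.List.slice e (some p) none ==
             PySem.List.slice e none (some (n - 1 - p))
          then some ((0 : Int), p)
          else
            let s := pvSe e p (n - p)
            if s = 0 then some (s, p) else pvLoopB e n rest (some (s, p))
      | some (bl, bp) =>
          let s := pvSe e p (n - p)
          let best2 := if s < bl then some (s, p) else some (bl, bp)
          match best2 with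
          | none => pvLoopB e n rest best2
          | some (bl2, _) => if bl2 = 0 then best2 else pvLoopB e n rest best2

def detect_arithmetic_period_alt (grundy : List Int) (max_p : Option Int) (max_d : Option Int) : List (Option Int) :=
  let n : Int := (grundy.length : Int)
  let mp : Int := match max_p with | none => n - 1 | some v => v
  let P : Int := min mp (n - 1)
  if P < 1 then [none, none, none] else
  let e := pvE grundy
  match pvLoopB e n (PySem.List.pyRange 1 (P + 1) 1) none with
  | none => [none, none, none]
  | some (l, p) => [some l, some p,
      some (PySem.List.pyGetD grundy (l + p) 0 - PySem.List.pyGetD grundy l 0)]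

-- ===== PRECONDITION & SPEC =====
def Spec_detect_arithmetic_period (grundy : List Int) (max_p : Option Int) (max_d : Option Int) (out : List (Option Int)) : Prop := out = detect_arithmetic_period_alt grundy max_p max_d
instance (grundy : List Int) (max_p : Option Int) (max_d : Option Int) (out : List (Option Int)) : Decidable (Spec_detect_arithmetic_period grundy max_p max_d out) := by unfold Spec_detect_arithmetic_period; infer_instance

-- ===== CLAIM (what is proved, stated in full; the proofs are below) =====
def Claim_equal_detect_arithmetic_period : Prop := ∀ (grundy : List Int) (max_p : Option Int) (max_d : Option Int), Dom_detect_arithmetic_period grundy max_p max_d → Spec_detect_arithmetic_period grundy max_p max_d (detect_arithmetic_period grundy max_p max_d)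

-- ===== LEMMAS AND PROOFS =====

-- A's and B's bodies with the `max_p is None` default already resolved
def pvMp (grundy : List Int) (max_p : Option Int) : Int :=
  match max_p with | none => (grundy.length : Int) - 1 | some v => v

-- the body of B's loop over p (update of the running best (l, p))
def pvF (grundy : List Int) (n : Int) : Option (Int × Int) → Int → Option (Int × Int) :=
  fun best p =>
    match best with
    | none => some (pvSe (pvE grundy) p (n - p), p)
    | some (bl, bp) => if pvSe (pvE grundy) p (n - p) < bl
        then some (pvSe (pvE grundy) p (n - p), p) else some (bl, bp)

def pvAcore (grundy : List Int) (mp : Int) : List (Option Int) :=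
  match (PySem.List.pyRange 0 (grundy.length : Int) 1).findSome? (fun l =>
    (PySem.List.pyRange 1 (min (mp + 1) ((grundy.length : Int) - l)) 1).findSome? (fun p =>
      if (PySem.List.pyRange l ((grundy.length : Int) - p) 1).all
          (fun i => PySem.List.pyGetD grundy i 0 +
            (PySem.List.pyGetD grundy (l + p) 0 - PySem.List.pyGetD grundy l 0) ==
            PySem.List.pyGetD grundy (i + p) 0)
      then some [some l, some p,
        some (PySem.List.pyGetD grundy (l + p) 0 - PySem.List.pyGetD grundy l 0)]
      else none)) with
  | some r => r
  | none => [none, none, none]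

def pvBcore (grundy : List Int) (mp : Int) : List (Option Int) :=
  if min mp ((grundy.length : Int) - 1) < 1 then [none, none, none] else
  match (PySem.List.pyRange 1 (min mp ((grundy.length : Int) - 1) + 1) 1).foldl
    (pvF grundy (grundy.length : Int)) (none : Option (Int × Int)) with
  | none => [none, none, none]
  | some (l, p) => [some l, some p,
      some (PySem.List.pyGetD grundy (l + p) 0 - PySem.List.pyGetD grundy l 0)]

lemma pvA_eq (grundy : List Int) (max_p max_d : Option Int) :
    detect_arithmetic_period grundy max_p max_d = pvAcore grundy (pvMp grundy max_p) := by
  cases max_p <;> rfl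

lemma pvE_getD (grundy : List Int) (j : Int) (h0 : 0 ≤ j)
    (h1 : j < (grundy.length : Int) - 1) :
    PySem.List.pyGetD (pvE grundy) j 0 =
    PySem.List.pyGetD grundy (j + 1) 0 - PySem.List.pyGetD grundy j 0 := by
  unfold pvE
  exact PySem.List.pyGetD_map_pyRange_of_nonneg _ _ _ _ h0 h1

lemma pvScan_nonneg (e : List Int) (p : Int) :
    ∀ l : List Int, (∀ j ∈ l, (0:Int) ≤ j) → 0 ≤ pvScan e p l := by
  intro l
  induction l with
  | nil => intro _; simp [pvScan]
  | cons a t ih =>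
      intro hmem
      have ha : (0:Int) ≤ a := hmem a (List.mem_cons_self)
      simp only [pvScan]
      split_ifs
      · omega
      · exact ih (fun j hj => hmem j (List.mem_cons_of_mem a hj))

lemma pvS_nonneg (e : List Int) (p m : Int) : 0 ≤ pvSe e p m := by
  unfold pvSe
  apply pvScan_nonneg
  intro j hj
  rw [PySem.List.mem_pyRange_neg_one] at hj
  omega

lemma pvScan_zero (e : List Int) (p : Int) :
    ∀ l : List Int,
      (∀ j ∈ l, PySem.List.pyGetD e (j + p) 0 = PySem.List.pyGetD e j 0) →
      pvScan e p l = 0 := by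
  intro l
  induction l with
  | nil => intro _; rfl
  | cons a t ih =>
      intro hmem
      simp only [pvScan]
      rw [if_neg (not_not_intro (hmem a (List.mem_cons_self)))]
      exact ih (fun j hj => hmem j (List.mem_cons_of_mem a hj))

lemma pvSlice_zero (grundy : List Int) (p : Int) (hp : 1 ≤ p)
    (hpn : p ≤ (grundy.length : Int) - 1)
    (heq : PySem.List.slice (pvE grundy) (some p) none =
           PySem.List.slice (pvE grundy) none (some ((grundy.length : Int) - 1 - p))) :
    pvSe (pvE grundy) p ((grundy.length : Int) - p) = 0 := by
  obtain ⟨pN, hpN⟩ : ∃ pN : ℕ, p = (pN : Int) :=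
    ⟨p.toNat, (Int.toNat_of_nonneg (by omega)).symm⟩
  rw [hpN] at heq hpn ⊢
  obtain ⟨bN, hbN⟩ : ∃ bN : ℕ, (grundy.length : Int) - 1 - (pN : Int) = (bN : Int) :=
    ⟨((grundy.length : Int) - 1 - (pN : Int)).toNat, (Int.toNat_of_nonneg (by omega)).symm⟩
  rw [hbN] at heq
  rw [PySem.List.slice_from_natCast, PySem.List.slice_to_natCast] at heq
  unfold pvSe
  apply pvScan_zero
  intro j hj
  rw [PySem.List.mem_pyRange_neg_one] at hj
  obtain ⟨jN, hjN⟩ : ∃ jN : ℕ, j = (jN : Int) :=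
    ⟨j.toNat, (Int.toNat_of_nonneg (by omega)).symm⟩
  rw [hjN]
  have hget := congrArg (fun l => l[jN]?) heq
  simp only [List.getElem?_drop, List.getElem?_take] at hget
  have hjb : jN < bN := by omega
  rw [if_pos hjb] at hget
  rw [show (jN : Int) + (pN : Int) = ((jN + pN : ℕ) : Int) from by push_cast; ring]
  rw [PySem.List.pyGetD_natCast, PySem.List.pyGetD_natCast,
      List.getD_eq_getElem?_getD, List.getD_eq_getElem?_getD]
  rw [show jN + pN = pN + jN from Nat.add_comm _ _, hget]

lemma pvFoldF_zero (grundy : List Int) (n : Int) :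
    ∀ (ps : List Int) (bp : Int),
      ps.foldl (pvF grundy n) (some ((0:Int), bp)) = some ((0:Int), bp) := by
  intro ps
  induction ps with
  | nil => intro bp; rfl
  | cons p t ih =>
      intro bp
      rw [List.foldl_cons,
        show pvF grundy n (some ((0:Int), bp)) p = some ((0:Int), bp) from
          if_neg (not_lt.mpr (pvS_nonneg (pvE grundy) p (n - p)))]
      exact ih bp

lemma pvLoop_eq (grundy : List Int) :
    ∀ (ps : List Int) (best : Option (Int × Int)),
      (∀ p ∈ ps, 1 ≤ p ∧ p ≤ (grundy.length : Int) - 1) →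
      pvLoopB (pvE grundy) (grundy.length : Int) ps best =
      ps.foldl (pvF grundy (grundy.length : Int)) best := by
  intro ps
  induction ps with
  | nil => intro best _; rfl
  | cons p t ih =>
      intro best hmem
      have hp := (hmem p (List.mem_cons_self)).1
      have hpn := (hmem p (List.mem_cons_self)).2
      have hmt : ∀ x ∈ t, 1 ≤ x ∧ x ≤ (grundy.length : Int) - 1 :=
        fun x hx => hmem x (List.mem_cons_of_mem p hx)
      rw [List.foldl_cons]
      cases best with
      | none =>
          rw [show pvF grundy (grundy.length : Int) none p =
            some (pvSe (pvE grundy) p ((grundy.length : Int) - p), p) from rfl]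
          show (if PySem.List.slice (pvE grundy) (some p) none ==
                 PySem.List.slice (pvE grundy) none (some ((grundy.length : Int) - 1 - p))
               then some ((0 : Int), p)
               else if pvSe (pvE grundy) p ((grundy.length : Int) - p) = 0
                 then some (pvSe (pvE grundy) p ((grundy.length : Int) - p), p)
                 else pvLoopB (pvE grundy) (grundy.length : Int) t
                   (some (pvSe (pvE grundy) p ((grundy.length : Int) - p), p))) = _
          by_cases hsl : PySem.List.slice (pvE grundy) (some p) none =
              PySem.List.slice (pvE grundy) none (some ((grundy.length : Int) - 1 - p))
          · rw [if_pos (beq_iff_eq.mpr hsl)]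
            have h0 := pvSlice_zero grundy p hp hpn hsl
            rw [h0]
            exact (pvFoldF_zero grundy (grundy.length : Int) t p).symm
          · rw [if_neg (fun hc => hsl (beq_iff_eq.mp hc))]
            by_cases h0 : pvSe (pvE grundy) p ((grundy.length : Int) - p) = 0
            · rw [if_pos h0, h0]
              exact (pvFoldF_zero grundy (grundy.length : Int) t p).symm
            · rw [if_neg h0]
              exact ih (some (pvSe (pvE grundy) p ((grundy.length : Int) - p), p)) hmt
      | some b =>
          obtain ⟨bl, bp⟩ := b
          rw [show pvF grundy (grundy.length : Int) (some (bl, bp)) p =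
            (if pvSe (pvE grundy) p ((grundy.length : Int) - p) < bl
              then some (pvSe (pvE grundy) p ((grundy.length : Int) - p), p)
              else some (bl, bp)) from rfl]
          show (match (if pvSe (pvE grundy) p ((grundy.length : Int) - p) < bl
                then some (pvSe (pvE grundy) p ((grundy.length : Int) - p), p) else some (bl, bp)) with
              | none => pvLoopB (pvE grundy) (grundy.length : Int) t
                  (if pvSe (pvE grundy) p ((grundy.length : Int) - p) < bl
                    then some (pvSe (pvE grundy) p ((grundy.length : Int) - p), p) else some (bl, bp))
              | some (bl2, _) => if bl2 = 0
                  then (if pvSe (pvE grundy) p ((grundy.length : Int) - p) < bl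
                    then some (pvSe (pvE grundy) p ((grundy.length : Int) - p), p) else some (bl, bp))
                  else pvLoopB (pvE grundy) (grundy.length : Int) t
                    (if pvSe (pvE grundy) p ((grundy.length : Int) - p) < bl
                      then some (pvSe (pvE grundy) p ((grundy.length : Int) - p), p) else some (bl, bp))) = _
          by_cases hlt : pvSe (pvE grundy) p ((grundy.length : Int) - p) < bl
          · rw [if_pos hlt]
            by_cases h0 : pvSe (pvE grundy) p ((grundy.length : Int) - p) = 0
            · show (if pvSe (pvE grundy) p ((grundy.length : Int) - p) = 0 then _ else _) = _
              rw [if_pos h0, h0]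
              exact (pvFoldF_zero grundy (grundy.length : Int) t p).symm
            · show (if pvSe (pvE grundy) p ((grundy.length : Int) - p) = 0 then _ else _) = _
              rw [if_neg h0]
              exact ih _ hmt
          · rw [if_neg hlt]
            by_cases h0 : bl = 0
            · show (if bl = 0 then _ else _) = _
              rw [if_pos h0, h0]
              exact (pvFoldF_zero grundy (grundy.length : Int) t bp).symm
            · show (if bl = 0 then _ else _) = _
              rw [if_neg h0]
              exact ih _ hmt

lemma pvBalt_core (grundy : List Int) (mp : Int) :
    (if min mp ((grundy.length : Int) - 1) < 1 then ([none, none, none] : List (Option Int)) else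
      match pvLoopB (pvE grundy) (grundy.length : Int)
          (PySem.List.pyRange 1 (min mp ((grundy.length : Int) - 1) + 1) 1) none with
      | none => [none, none, none]
      | some (l, p) => [some l, some p,
          some (PySem.List.pyGetD grundy (l + p) 0 - PySem.List.pyGetD grundy l 0)]) =
    pvBcore grundy mp := by
  by_cases hP : min mp ((grundy.length : Int) - 1) < 1
  · unfold pvBcore
    rw [if_pos hP, if_pos hP]
  · unfold pvBcore
    rw [if_neg hP, if_neg hP]
    have hmem : ∀ x ∈ PySem.List.pyRange 1 (min mp ((grundy.length : Int) - 1) + 1) 1,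
        1 ≤ x ∧ x ≤ (grundy.length : Int) - 1 := by
      intro x hx
      rw [PySem.List.mem_pyRange_one] at hx
      constructor <;> omega
    rw [pvLoop_eq grundy _ none hmem]

lemma pvB_eq (grundy : List Int) (max_p max_d : Option Int) :
    detect_arithmetic_period_alt grundy max_p max_d = pvBcore grundy (pvMp grundy max_p) := by
  cases max_p with
  | none => exact pvBalt_core grundy ((grundy.length : Int) - 1)
  | some v => exact pvBalt_core grundy v

lemma pvFindSome_none {α : Type} (f : Int → Option α) (a b : Int)
    (h : ∀ y, a ≤ y → y < b → f y = none) :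
    (PySem.List.pyRange a b 1).findSome? f = none := by
  rw [List.findSome?_eq_none_iff]
  intro x hx
  rw [PySem.List.mem_pyRange_one] at hx
  exact h x hx.1 hx.2

lemma pvFindSome_first {α : Type} (f : Int → Option α) (a b x : Int) (r : α)
    (hax : a ≤ x) (hxb : x < b)
    (hnone : ∀ y, a ≤ y → y < x → f y = none) (hx : f x = some r) :
    (PySem.List.pyRange a b 1).findSome? f = some r := by
  rw [PySem.List.pyRange_one_append a x b hax (le_of_lt hxb), List.findSome?_append,
      pvFindSome_none f a x hnone, PySem.List.pyRange_one_cons hxb]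
  simp [hx]

lemma pvScan_spec (grundy : List Int) (p : Int) (hp : 1 ≤ p) :
    ∀ k : ℕ, (k : Int) ≤ (grundy.length : Int) - p - 1 →
      0 ≤ pvScan (pvE grundy) p (PySem.List.pyRange ((k : Int) - 1) (-1) (-1)) ∧
      pvScan (pvE grundy) p (PySem.List.pyRange ((k : Int) - 1) (-1) (-1)) ≤ (k : Int) ∧
      (∀ j, pvScan (pvE grundy) p (PySem.List.pyRange ((k : Int) - 1) (-1) (-1)) < j → j ≤ (k : Int) →
        PySem.List.pyGetD grundy (j + p) 0 - PySem.List.pyGetD grundy j 0 =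
        PySem.List.pyGetD grundy (j - 1 + p) 0 - PySem.List.pyGetD grundy (j - 1) 0) ∧
      (0 < pvScan (pvE grundy) p (PySem.List.pyRange ((k : Int) - 1) (-1) (-1)) →
        PySem.List.pyGetD grundy (pvScan (pvE grundy) p (PySem.List.pyRange ((k : Int) - 1) (-1) (-1)) + p) 0 -
          PySem.List.pyGetD grundy (pvScan (pvE grundy) p (PySem.List.pyRange ((k : Int) - 1) (-1) (-1))) 0 ≠
        PySem.List.pyGetD grundy (pvScan (pvE grundy) p (PySem.List.pyRange ((k : Int) - 1) (-1) (-1)) - 1 + p) 0 -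
          PySem.List.pyGetD grundy (pvScan (pvE grundy) p (PySem.List.pyRange ((k : Int) - 1) (-1) (-1)) - 1) 0) := by
  intro k
  induction k with
  | zero =>
      intro _
      rw [show ((0:ℕ):Int) - 1 = -1 from by norm_num,
          PySem.List.pyRange_neg_one_eq_nil (le_refl (-1))]
      simp only [pvScan]
      refine ⟨le_refl 0, by norm_num, ?_, ?_⟩
      · intro j h1 h2; omega
      · intro h; omega
  | succ k ih =>
      intro hk1
      push_cast at hk1 ⊢
      rw [show (k:Int) + 1 - 1 = (k:Int) from by ring,
          PySem.List.pyRange_neg_one_cons (by omega : (-1:Int) < (k:Int))]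
      simp only [pvScan]
      have he1 : PySem.List.pyGetD (pvE grundy) ((k:Int) + p) 0 =
          PySem.List.pyGetD grundy ((k:Int) + p + 1) 0 - PySem.List.pyGetD grundy ((k:Int) + p) 0 :=
        pvE_getD grundy _ (by omega) (by omega)
      have he2 : PySem.List.pyGetD (pvE grundy) (k:Int) 0 =
          PySem.List.pyGetD grundy ((k:Int) + 1) 0 - PySem.List.pyGetD grundy (k:Int) 0 :=
        pvE_getD grundy _ (by omega) (by omega)
      by_cases hbr : PySem.List.pyGetD (pvE grundy) ((k:Int) + p) 0 ≠
          PySem.List.pyGetD (pvE grundy) (k:Int) 0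
      · rw [if_pos hbr]
        rw [he1, he2] at hbr
        refine ⟨by omega, le_refl _, ?_, ?_⟩
        · intro j h1 h2; omega
        · intro _
          rw [show (k:Int) + 1 - 1 + p = (k:Int) + p from by ring,
              show (k:Int) + 1 - 1 = (k:Int) from by ring,
              show (k:Int) + 1 + p = (k:Int) + p + 1 from by ring]
          omega
      · rw [if_neg hbr]
        rw [he1, he2] at hbr
        obtain ⟨i0, i1, i2, i3⟩ := ih (by omega)
        refine ⟨i0, by omega, ?_, i3⟩
        intro j h1 h2
        have : j ≤ (k:Int) ∨ j = (k:Int) + 1 := by omega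
        rcases this with h | h
        · exact i2 j h1 h
        · subst h
          have hbe := not_not.mp hbr
          rw [show (k:Int) + 1 - 1 + p = (k:Int) + p from by ring,
              show (k:Int) + 1 - 1 = (k:Int) from by ring,
              show (k:Int) + 1 + p = (k:Int) + p + 1 from by ring]
          omega

lemma pvS_spec (grundy : List Int) (p : Int) (hp : 1 ≤ p)
    (hpn : p ≤ (grundy.length : Int) - 1) :
    0 ≤ pvSe (pvE grundy) p ((grundy.length : Int) - p) ∧
    pvSe (pvE grundy) p ((grundy.length : Int) - p) < (grundy.length : Int) - p ∧
    (∀ j, pvSe (pvE grundy) p ((grundy.length : Int) - p) < j → j < (grundy.length : Int) - p →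
      PySem.List.pyGetD grundy (j + p) 0 - PySem.List.pyGetD grundy j 0 =
      PySem.List.pyGetD grundy (j - 1 + p) 0 - PySem.List.pyGetD grundy (j - 1) 0) ∧
    (0 < pvSe (pvE grundy) p ((grundy.length : Int) - p) →
      PySem.List.pyGetD grundy (pvSe (pvE grundy) p ((grundy.length : Int) - p) + p) 0 -
        PySem.List.pyGetD grundy (pvSe (pvE grundy) p ((grundy.length : Int) - p)) 0 ≠
      PySem.List.pyGetD grundy (pvSe (pvE grundy) p ((grundy.length : Int) - p) - 1 + p) 0 -
        PySem.List.pyGetD grundy (pvSe (pvE grundy) p ((grundy.length : Int) - p) - 1) 0) := by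
  have h := pvScan_spec grundy p hp ((grundy.length : Int) - p - 1).toNat
    (by rw [Int.toNat_of_nonneg (by omega)])
  rw [Int.toNat_of_nonneg (by omega : (0:Int) ≤ (grundy.length : Int) - p - 1)] at h
  rw [show (grundy.length : Int) - p - 1 - 1 = (grundy.length : Int) - p - 2 from by ring] at h
  obtain ⟨h0, h1, h2, h3⟩ := h
  unfold pvSe
  exact ⟨h0, by omega, fun j hj1 hj2 => h2 j hj1 (by omega), h3⟩

lemma pvAll_iff (grundy : List Int) (p l : Int)
    (hp : 1 ≤ p) (hpn : p ≤ (grundy.length : Int) - 1)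
    (hl : 0 ≤ l) (hln : l < (grundy.length : Int) - p) :
    ((PySem.List.pyRange l ((grundy.length : Int) - p) 1).all
       (fun i => PySem.List.pyGetD grundy i 0 +
           (PySem.List.pyGetD grundy (l + p) 0 - PySem.List.pyGetD grundy l 0) ==
           PySem.List.pyGetD grundy (i + p) 0) = true)
    ↔ pvSe (pvE grundy) p ((grundy.length : Int) - p) ≤ l := by
  obtain ⟨hs0, hslt, hadj, hbrk⟩ := pvS_spec grundy p hp hpn
  rw [List.all_eq_true]
  constructor
  · intro hall
    by_contra hsl
    push_neg at hsl
    have h1 := hall (pvSe (pvE grundy) p ((grundy.length : Int) - p))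
      (by rw [PySem.List.mem_pyRange_one]; omega)
    have h2 := hall (pvSe (pvE grundy) p ((grundy.length : Int) - p) - 1)
      (by rw [PySem.List.mem_pyRange_one]; omega)
    rw [beq_iff_eq] at h1 h2
    have := hbrk (by omega)
    omega
  · intro hs i hi
    rw [PySem.List.mem_pyRange_one] at hi
    rw [beq_iff_eq]
    have key : ∀ i : Int, l ≤ i → i < (grundy.length : Int) - p →
        PySem.List.pyGetD grundy (i + p) 0 - PySem.List.pyGetD grundy i 0 =
        PySem.List.pyGetD grundy (l + p) 0 - PySem.List.pyGetD grundy l 0 := by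
      intro i hli
      induction i, hli using Int.le_induction with
      | base => intro _; rfl
      | succ i hli ihh =>
          intro hi2
          have hj := hadj (i + 1) (by omega) (by omega)
          rw [show i + 1 - 1 + p = i + p from by ring, show i + 1 - 1 = i from by ring] at hj
          have := ihh (by omega)
          omega
    have := key i hi.1 hi.2
    omega

lemma pvBfold (grundy : List Int) :
    ∀ q : Int, 1 ≤ q →
    ∃ bl bp : Int,
      (PySem.List.pyRange 1 (q + 1) 1).foldl
        (pvF grundy (grundy.length : Int)) (none : Option (Int × Int)) = some (bl, bp) ∧
      1 ≤ bp ∧ bp ≤ q ∧ pvSe (pvE grundy) bp ((grundy.length : Int) - bp) = bl ∧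
      (∀ p, 1 ≤ p → p ≤ q → bl ≤ pvSe (pvE grundy) p ((grundy.length : Int) - p)) ∧
      (∀ p, 1 ≤ p → p < bp → bl < pvSe (pvE grundy) p ((grundy.length : Int) - p)) := by
  intro q hq
  induction q, hq using Int.le_induction with
  | base =>
      refine ⟨pvSe (pvE grundy) 1 ((grundy.length : Int) - 1), 1, ?_, le_refl 1, le_refl 1, rfl, ?_, ?_⟩
      · rw [PySem.List.pyRange_one_singleton]
        rfl
      · intro p h1 h2
        have : p = 1 := by omega
        subst this; exact le_refl _
      · intro p h1 h2; omega
  | succ q hq ih =>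
      obtain ⟨bl, bp, hfold, hbp1, hbpq, hbl, hmin, hstrict⟩ := ih
      by_cases hlt : pvSe (pvE grundy) (q + 1) ((grundy.length : Int) - (q + 1)) < bl
      · refine ⟨pvSe (pvE grundy) (q + 1) ((grundy.length : Int) - (q + 1)), q + 1, ?_, by omega, le_refl _, rfl, ?_, ?_⟩
        · rw [PySem.List.pyRange_one_succ_right (by omega : (1:Int) ≤ q + 1), List.foldl_append, hfold]
          show (if pvSe (pvE grundy) (q+1) ((grundy.length : Int) - (q+1)) < bl
                then some (pvSe (pvE grundy) (q+1) ((grundy.length : Int) - (q+1)), q+1)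
                else some (bl, bp)) = _
          rw [if_pos hlt]
        · intro p h1 h2
          have : p ≤ q ∨ p = q + 1 := by omega
          rcases this with h | h
          · exact le_trans (le_of_lt hlt) (hmin p h1 h)
          · subst h; exact le_refl _
        · intro p h1 h2
          exact lt_of_lt_of_le hlt (hmin p h1 (by omega))
      · refine ⟨bl, bp, ?_, hbp1, by omega, hbl, ?_, hstrict⟩
        · rw [PySem.List.pyRange_one_succ_right (by omega : (1:Int) ≤ q + 1), List.foldl_append, hfold]
          show (if pvSe (pvE grundy) (q+1) ((grundy.length : Int) - (q+1)) < bl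
                then some (pvSe (pvE grundy) (q+1) ((grundy.length : Int) - (q+1)), q+1)
                else some (bl, bp)) = _
          rw [if_neg hlt]
        · intro p h1 h2
          have : p ≤ q ∨ p = q + 1 := by omega
          rcases this with h | h
          · exact hmin p h1 h
          · subst h; omega

lemma pvCore (grundy : List Int) (mp : Int) : pvAcore grundy mp = pvBcore grundy mp := by
  by_cases hP : min mp ((grundy.length : Int) - 1) < 1
  · unfold pvAcore pvBcore
    rw [if_pos hP]
    have houter : (PySem.List.pyRange 0 (grundy.length : Int) 1).findSome? (fun l =>
        (PySem.List.pyRange 1 (min (mp + 1) ((grundy.length : Int) - l)) 1).findSome? (fun p =>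
          if (PySem.List.pyRange l ((grundy.length : Int) - p) 1).all
              (fun i => PySem.List.pyGetD grundy i 0 +
                (PySem.List.pyGetD grundy (l + p) 0 - PySem.List.pyGetD grundy l 0) ==
                PySem.List.pyGetD grundy (i + p) 0)
          then some [some l, some p,
            some (PySem.List.pyGetD grundy (l + p) 0 - PySem.List.pyGetD grundy l 0)]
          else none)) = none := by
      apply pvFindSome_none
      intro y hy0 hyn
      apply pvFindSome_none
      intro p hp1 hp2
      exfalso; omega
    rw [houter]
  · push_neg at hP
    obtain ⟨bl, bp, hfold, hbp1, hbpP, hbl, hmin, hstrict⟩ :=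
      pvBfold grundy (min mp ((grundy.length : Int) - 1)) hP
    obtain ⟨hs0, hslt, -, -⟩ := pvS_spec grundy bp hbp1 (by omega)
    have hbl0 : 0 ≤ bl := hbl ▸ hs0
    have hblN : bl < (grundy.length : Int) - bp := hbl ▸ hslt
    have houter : (PySem.List.pyRange 0 (grundy.length : Int) 1).findSome? (fun l =>
        (PySem.List.pyRange 1 (min (mp + 1) ((grundy.length : Int) - l)) 1).findSome? (fun p =>
          if (PySem.List.pyRange l ((grundy.length : Int) - p) 1).all
              (fun i => PySem.List.pyGetD grundy i 0 +
                (PySem.List.pyGetD grundy (l + p) 0 - PySem.List.pyGetD grundy l 0) ==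
                PySem.List.pyGetD grundy (i + p) 0)
          then some [some l, some p,
            some (PySem.List.pyGetD grundy (l + p) 0 - PySem.List.pyGetD grundy l 0)]
          else none)) = some [some bl, some bp,
            some (PySem.List.pyGetD grundy (bl + bp) 0 - PySem.List.pyGetD grundy bl 0)] := by
      apply pvFindSome_first _ 0 (grundy.length : Int) bl _ hbl0 (by omega)
      · intro y hy0 hyb
        apply pvFindSome_none
        intro p hp1 hp2
        refine if_neg ?_
        rw [pvAll_iff grundy p y hp1 (by omega) hy0 (by omega)]
        have := hmin p hp1 (by omega)
        omega
      · apply pvFindSome_first _ 1 (min (mp + 1) ((grundy.length : Int) - bl)) bp _ hbp1 (by omega)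
        · intro p hp1 hpb
          refine if_neg ?_
          rw [pvAll_iff grundy p bl hp1 (by omega) hbl0 (by omega)]
          have := hstrict p hp1 hpb
          omega
        · refine if_pos ?_
          rw [pvAll_iff grundy bp bl hbp1 (by omega) hbl0 hblN]
          omega
    unfold pvAcore pvBcore
    rw [if_neg (not_lt.mpr hP), hfold, houter]

-- ===== VERDICT (by name: the statement is the Claim_ definition above) =====
theorem detect_arithmetic_period_spec : Claim_equal_detect_arithmetic_period := by
  unfold Claim_equal_detect_arithmetic_period
  intro grundy max_p max_d _
  unfold Spec_detect_arithmetic_period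
  rw [pvA_eq grundy max_p max_d, pvB_eq grundy max_p max_d, pvCore]
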